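-- pv_equiv track=rewrite | github.com/reshinto/algo_flow | src/algorithms/stacks-queues/queue-design/design-circular-queue/sources/design-circular-queue.py | design_circular_queue
-- ===== SOURCE A (Python) =====
-- from typing import List, Optional
--
-- def design_circular_queue(operations: List[str], capacity: int) -> List[str]:
--     buffer: List[Optional[int]] = [None] * capacity  # @step:initialize
--     front_index: int = -1  # @step:initialize
--     rear_index: int = -1  # @step:initialize
--     queue_size: int = 0  # @step:initialize
--     results: List[str] = []  # @step:initialize
--
--     for operation in operations:  # @step:visit
--         if operation.startswith("enqueue"):
--             parts = operation.split(" ")  # @step:enqueue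
--             value = int(parts[1])  # @step:enqueue
--
--             if queue_size == capacity:  # @step:enqueue
--                 results.append("full")  # @step:enqueue
--             else:
--                 if front_index == -1:  # @step:enqueue
--                     front_index = 0  # @step:enqueue
--                 rear_index = (rear_index + 1) % capacity  # @step:enqueue
--                 buffer[rear_index] = value  # @step:enqueue
--                 queue_size += 1  # @step:enqueue
--                 results.append("true")  # @step:enqueue
--
--         elif operation == "dequeue":
--             if queue_size == 0:  # @step:dequeue
--                 results.append("empty")  # @step:dequeue
--             else:
--                 dequeued_value = buffer[front_index]  # @step:dequeue
--                 buffer[front_index] = None  # @step:dequeue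
--                 if front_index == rear_index:  # @step:dequeue
--                     front_index = -1  # @step:dequeue
--                     rear_index = -1  # @step:dequeue
--                 else:
--                     front_index = (front_index + 1) % capacity  # @step:dequeue
--                 queue_size -= 1  # @step:dequeue
--                 results.append(str(dequeued_value))  # @step:dequeue
--
--         elif operation == "front":
--             if front_index == -1:  # @step:peek
--                 results.append("empty")  # @step:peek
--             else:
--                 results.append(str(buffer[front_index]))  # @step:peek
--
--         elif operation == "rear":
--             if rear_index == -1:  # @step:peek
--                 results.append("empty")  # @step:peek
--             else:
--                 results.append(str(buffer[rear_index]))  # @step:peek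
--
--     return results  # @step:complete
-- ===== SOURCE B (Python) =====
-- from typing import List
--
-- def design_circular_queue(operations: List[str], capacity: int) -> List[str]:
--     queue: List[int] = []
--     results: List[str] = []
--     for operation in operations:
--         if operation.startswith("enqueue"):
--             value = int(operation.split(" ")[1])
--             if len(queue) == capacity:
--                 results.append("full")
--             else:
--                 queue.append(value)
--                 results.append("true")
--         elif operation == "dequeue":
--             if not queue:
--                 results.append("empty")
--             else:
--                 results.append(str(queue.pop(0)))
--         elif operation == "front":
--             results.append("empty" if not queue else str(queue[0]))
--         elif operation == "rear":
--             results.append("empty" if not queue else str(queue[-1]))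
--     return results
-- ===== Notes on version B (the rewrite author's own statement) =====
-- stated objective: simpler
-- what changed: Replaces the fixed-size ring buffer with front/rear/size indices, -1 sentinels and modular arithmetic by a single plain FIFO list, so all index bookkeeping and sentinel resets disappear.
import Mathlib
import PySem

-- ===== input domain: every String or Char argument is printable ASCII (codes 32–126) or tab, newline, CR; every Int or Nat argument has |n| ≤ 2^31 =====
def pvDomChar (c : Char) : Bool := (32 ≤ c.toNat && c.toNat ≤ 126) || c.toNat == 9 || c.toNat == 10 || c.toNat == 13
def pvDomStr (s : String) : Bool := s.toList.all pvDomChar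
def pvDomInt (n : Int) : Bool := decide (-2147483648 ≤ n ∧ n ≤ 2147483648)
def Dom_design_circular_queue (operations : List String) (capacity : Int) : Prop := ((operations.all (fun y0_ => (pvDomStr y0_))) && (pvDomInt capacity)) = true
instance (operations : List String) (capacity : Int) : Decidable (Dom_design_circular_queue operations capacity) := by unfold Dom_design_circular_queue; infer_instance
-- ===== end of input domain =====

-- B replaces A's fixed ring buffer (front/rear/size indices, -1 sentinels, modular arithmetic)
-- by a single plain FIFO list: simpler, same results wherever A returns (return value only; neither mutates its arguments).


-- ===== PORT A =====
-- value = int(operation.split(" ")[1]); none exactly where Python raises (IndexError / ValueError), excluded by Pre_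
def dcqParse? (operation : String) : Option Int :=
  match PySem.Str.split? operation " " with
  | some parts =>
    match PySem.List.pyGet? parts 1 with
    | some s => PySem.Int.ofStr? s
    | none => none
  | none => none

-- str(x) for the Optional[int] buffer cells ("None" is unreachable under Pre_)
def dcqStr : Option Int → String
  | some n => PySem.Int.toStr n
  | none => "None"

-- one loop iteration of A over the state (buffer, front_index, rear_index, queue_size, results);
-- buffer reads/writes use the total pyGetD/pySetD forms, exact while the index is in range (always, under Pre_)
def dcqStepA (capacity : Int) (st : List (Option Int) × Int × Int × Int × List String)
    (operation : String) : List (Option Int) × Int × Int × Int × List String :=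
  let (buffer, front, rear, size, results) := st
  if PySem.Str.startswith operation "enqueue" then
    match dcqParse? operation with
    | none => st  -- Python raises here; outside Pre_
    | some value =>
      if size = capacity then (buffer, front, rear, size, results ++ ["full"])
      else
        let front' := if front = -1 then 0 else front
        let rear' := PySem.Int.mod (rear + 1) capacity
        (PySem.List.pySetD buffer rear' (some value), front', rear', size + 1, results ++ ["true"])
  else if operation = "dequeue" then
    if size = 0 then (buffer, front, rear, size, results ++ ["empty"])
    else
      let dv := PySem.List.pyGetD buffer front none
      let buffer' := PySem.List.pySetD buffer front none
      if front = rear then (buffer', -1, -1, size - 1, results ++ [dcqStr dv])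
      else (buffer', PySem.Int.mod (front + 1) capacity, rear, size - 1, results ++ [dcqStr dv])
  else if operation = "front" then
    if front = -1 then (buffer, front, rear, size, results ++ ["empty"])
    else (buffer, front, rear, size, results ++ [dcqStr (PySem.List.pyGetD buffer front none)])
  else if operation = "rear" then
    if rear = -1 then (buffer, front, rear, size, results ++ ["empty"])
    else (buffer, front, rear, size, results ++ [dcqStr (PySem.List.pyGetD buffer rear none)])
  else st

def design_circular_queue (operations : List String) (capacity : Int) : List String :=
  (operations.foldl (dcqStepA capacity) (List.replicate capacity.toNat none, -1, -1, 0, [])).2.2.2.2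

-- ===== PORT B =====
-- one loop iteration of B over the state (queue, results): a plain FIFO list, no indices
def dcqStepB (capacity : Int) (st : List Int × List String) (operation : String) :
    List Int × List String :=
  let (queue, results) := st
  if PySem.Str.startswith operation "enqueue" then
    match dcqParse? operation with
    | none => st  -- Python raises here; outside Pre_
    | some value =>
      if (queue.length : Int) = capacity then (queue, results ++ ["full"])
      else (queue ++ [value], results ++ ["true"])
  else if operation = "dequeue" then
    match queue with                    -- queue.pop(0)
    | [] => (queue, results ++ ["empty"])
    | x :: rest => (rest, results ++ [PySem.Int.toStr x])
  else if operation = "front" then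
    (queue, results ++ [match queue with | [] => "empty" | x :: _ => PySem.Int.toStr x])
  else if operation = "rear" then
    (queue, results ++ [match queue.getLast? with | none => "empty" | some x => PySem.Int.toStr x])
  else st

def design_circular_queue_alt (operations : List String) (capacity : Int) : List String :=
  (operations.foldl (dcqStepB capacity) ([], [])).2

-- ===== PRECONDITION & SPEC =====
-- every operation that startswith "enqueue" must carry a parseable integer argument
def pvEnqOk (operation : String) : Bool :=
  !PySem.Str.startswith operation "enqueue" || (dcqParse? operation).isSome

-- Pre_ excludes exactly the inputs on which A raises: an "enqueue" operation whose argument is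
-- missing or not int-parseable (ValueError/IndexError), and a negative capacity together with any
-- enqueue (IndexError: assignment into the empty buffer).  A returns on every input satisfying Pre_.
def Pre_design_circular_queue (operations : List String) (capacity : Int) : Prop :=
  operations.all pvEnqOk = true ∧
  (0 ≤ capacity ∨ operations.all (fun op => !PySem.Str.startswith op "enqueue") = true)
instance (operations : List String) (capacity : Int) : Decidable (Pre_design_circular_queue operations capacity) := by unfold Pre_design_circular_queue; infer_instance

def pvWitness_design_circular_queue : List String × Int :=
  (["enqueue 1", "enqueue 2", "enqueue 3", "front", "rear", "dequeue", "rear", "enqueue 4", "front", "dequeue", "dequeue", "dequeue", "rear"], 2)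

def Spec_design_circular_queue (operations : List String) (capacity : Int) (out : List String) : Prop := out = design_circular_queue_alt operations capacity
instance (operations : List String) (capacity : Int) (out : List String) : Decidable (Spec_design_circular_queue operations capacity out) := by unfold Spec_design_circular_queue; infer_instance

-- ===== CLAIM (what is proved, stated in full; the proofs are below) =====
def Claim_equal_design_circular_queue : Prop := ∀ (operations : List String) (capacity : Int), Dom_design_circular_queue operations capacity → Pre_design_circular_queue operations capacity → Spec_design_circular_queue operations capacity (design_circular_queue operations capacity)


-- ===== LEMMAS AND PROOFS =====

-- the coupling invariant between A's ring-buffer state and B's plain queue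
def dcqInv (capacity : Int) (buffer : List (Option Int)) (front rear size : Int)
    (queue : List Int) : Prop :=
  buffer.length = capacity.toNat ∧ 0 ≤ capacity ∧
  size = (queue.length : Int) ∧ (queue.length : Int) ≤ capacity ∧
  (queue = [] → front = -1 ∧ rear = -1) ∧
  (queue ≠ [] →
    0 ≤ front ∧ front < capacity ∧
    rear = PySem.Int.mod (front + (queue.length : Int) - 1) capacity ∧
    ∀ (i : Nat) (h : i < queue.length),
      PySem.List.pyGetD buffer (PySem.Int.mod (front + (i : Int)) capacity) none = some queue[i])

-- Python '%' with a positive divisor, specialised glue facts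
theorem dcq_mod_self {a c : Int} (h0 : 0 ≤ a) (h1 : a < c) : PySem.Int.mod a c = a := by
  rw [PySem.Int.mod_eq_emod_of_pos (lt_of_le_of_lt h0 h1)]
  exact Int.emod_eq_of_lt h0 h1

theorem dcq_mod_shift (a b : Int) {c : Int} (hc : 0 < c) :
    PySem.Int.mod (PySem.Int.mod a c + b) c = PySem.Int.mod (a + b) c := by
  rw [PySem.Int.mod_eq_emod_of_pos hc, PySem.Int.mod_eq_emod_of_pos hc,
    PySem.Int.mod_eq_emod_of_pos hc, Int.emod_add_emod]

theorem dcq_mod_ne {a d c : Int} (hd0 : 0 < d) (hdc : d < c) :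
    PySem.Int.mod (a + d) c ≠ PySem.Int.mod a c := by
  have hc : 0 < c := lt_trans hd0 hdc
  rw [PySem.Int.mod_eq_emod_of_pos hc, PySem.Int.mod_eq_emod_of_pos hc]
  intro h
  rw [Int.emod_eq_emod_iff_emod_sub_eq_zero] at h
  simp only [add_sub_cancel_left] at h
  rw [Int.emod_eq_of_lt (le_of_lt hd0) hdc] at h
  omega

-- Int-index form of PySem.List.pyGetD_pySetD_natCast (cast glue only)
theorem dcq_getD_setD {alpha : Type} (xs : List alpha) (j i : Int) (v d : alpha)
    (hj0 : 0 <= j) (hj : j < (xs.length : Int)) (hi0 : 0 <= i) (hi : i < (xs.length : Int)) :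
    PySem.List.pyGetD (PySem.List.pySetD xs j v) i d
      = if i = j then v else PySem.List.pyGetD xs i d := by
  obtain ⟨n, rfl⟩ := Int.eq_ofNat_of_zero_le hj0
  obtain ⟨m, rfl⟩ := Int.eq_ofNat_of_zero_le hi0
  rw [PySem.List.pyGetD_pySetD_natCast xs n m v d (by exact_mod_cast hj)]
  simp [Nat.cast_inj]

-- basic consequences of the invariant
theorem dcq_cap_pos {capacity : Int} {buffer : List (Option Int)} {front rear size : Int}
    {x : Int} {rest : List Int} (hinv : dcqInv capacity buffer front rear size (x :: rest)) :
    0 < capacity := by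
  obtain ⟨-, -, -, hle, -, -⟩ := hinv
  have : (0:Int) < ((x :: rest).length : Int) := by simp
  omega

theorem dcq_front_read {capacity : Int} {buffer : List (Option Int)} {front rear size : Int}
    {x : Int} {rest : List Int} (hinv : dcqInv capacity buffer front rear size (x :: rest)) :
    PySem.List.pyGetD buffer front none = some x := by
  obtain ⟨-, -, -, -, -, hne⟩ := hinv
  obtain ⟨hf0, hfc, -, helem⟩ := hne (by simp)
  have h0 := helem 0 (by simp)
  simpa [dcq_mod_self hf0 hfc] using h0

theorem dcq_rear_read {capacity : Int} {buffer : List (Option Int)} {front rear size : Int}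
    {x : Int} {rest : List Int} (hinv : dcqInv capacity buffer front rear size (x :: rest)) :
    PySem.List.pyGetD buffer rear none = some ((x :: rest).getLast (by simp)) := by
  obtain ⟨-, -, -, -, -, hne⟩ := hinv
  obtain ⟨-, -, hrear, helem⟩ := hne (by simp)
  have hlast := helem ((x :: rest).length - 1) (by simp)
  rw [List.getLast_eq_getElem]
  rw [hrear]
  have hcast : (((x :: rest).length - 1 : Nat) : Int) = ((x :: rest).length : Int) - 1 := by
    simp only [List.length_cons]
    omega
  rw [show front + ((x :: rest).length : Int) - 1 = front + (((x :: rest).length - 1 : Nat) : Int) by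
    rw [hcast]; ring]
  exact hlast

theorem dcq_front_sentinel {capacity : Int} {buffer : List (Option Int)} {front rear size : Int}
    {queue : List Int} (hinv : dcqInv capacity buffer front rear size queue) :
    (front = -1 ↔ queue = []) := by
  obtain ⟨-, -, -, -, hemp, hne⟩ := hinv
  constructor
  · intro hf
    by_contra hq
    obtain ⟨hf0, -, -, -⟩ := hne hq
    omega
  · intro hq
    exact (hemp hq).1

theorem dcq_rear_sentinel {capacity : Int} {buffer : List (Option Int)} {front rear size : Int}
    {queue : List Int} (hinv : dcqInv capacity buffer front rear size queue) :
    (rear = -1 ↔ queue = []) := by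
  obtain ⟨-, -, -, hle, hemp, hne⟩ := hinv
  constructor
  · intro hr
    by_contra hq
    obtain ⟨-, -, hrear, -⟩ := hne hq
    have hcpos : 0 < capacity := by
      have : queue.length ≠ 0 := fun h => hq (List.length_eq_zero_iff.mp h)
      omega
    have := PySem.Int.mod_nonneg (front + (queue.length : Int) - 1) hcpos
    omega
  · intro hq
    exact (hemp hq).2

theorem dcq_fr_iff {capacity : Int} {buffer : List (Option Int)} {front rear size : Int}
    {x : Int} {rest : List Int} (hinv : dcqInv capacity buffer front rear size (x :: rest)) :
    (front = rear ↔ rest = []) := by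
  have hcpos := dcq_cap_pos hinv
  obtain ⟨-, -, -, hle, -, hne⟩ := hinv
  obtain ⟨hf0, hfc, hrear, -⟩ := hne (by simp)
  constructor
  · intro hfr
    by_contra hrne
    have hlen2 : 2 <= (x :: rest).length := by
      cases rest with
      | nil => exact absurd rfl hrne
      | cons b bs => simp
    have hd0 : (0:Int) < ((x :: rest).length : Int) - 1 := by
      have : (2:Int) <= ((x :: rest).length : Int) := by exact_mod_cast hlen2
      omega
    have hdc : ((x :: rest).length : Int) - 1 < capacity := by
      simp at hle ⊢; omega
    have hmodne := dcq_mod_ne (a := front) hd0 hdc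
    rw [show front + (((x :: rest).length : Int) - 1) = front + ((x :: rest).length : Int) - 1 by ring] at hmodne
    rw [← hrear, dcq_mod_self hf0 hfc] at hmodne
    exact hmodne hfr.symm
  · intro hrnil
    subst hrnil
    rw [hrear]
    simp only [List.length_cons, List.length_nil]
    rw [show front + ((0 + 1 : Nat) : Int) - 1 = front by simp]
    exact (dcq_mod_self hf0 hfc).symm

-- enqueue preserves the invariant (queue.length < capacity)
theorem dcq_inv_enq {capacity : Int} {buffer : List (Option Int)} {front rear size : Int}
    {queue : List Int} (hinv : dcqInv capacity buffer front rear size queue)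
    (hlt : (queue.length : Int) < capacity) (v : Int) :
    dcqInv capacity (PySem.List.pySetD buffer (PySem.Int.mod (rear + 1) capacity) (some v))
      (if front = -1 then 0 else front) (PySem.Int.mod (rear + 1) capacity)
      (size + 1) (queue ++ [v]) := by
  obtain ⟨hblen, hcap0, hsize, hle, hemp, hne⟩ := hinv
  have hcpos : 0 < capacity := by omega
  have hblen' : ((buffer.length : Int)) = capacity := by omega
  by_cases hq : queue = []
  · subst hq
    obtain ⟨hf, hr⟩ := hemp rfl
    subst hf; subst hr
    have hR : PySem.Int.mod (-1 + 1) capacity = 0 := by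
      rw [show (-1 + 1 : Int) = 0 by ring]
      exact dcq_mod_self le_rfl hcpos
    rw [hR, if_pos rfl]
    refine ⟨by simp [PySem.List.length_pySetD, hblen], hcap0, by simp at hsize ⊢; omega,
      by simp; omega, by simp, ?_⟩
    intro _
    refine ⟨le_rfl, hcpos, ?_, ?_⟩
    · simp only [List.nil_append, List.length_cons, List.length_nil]
      rw [show (0:Int) + ((0 + 1 : Nat) : Int) - 1 = 0 by simp]
      exact (dcq_mod_self le_rfl hcpos).symm
    · intro i hi
      simp only [List.nil_append, List.length_cons, List.length_nil] at hi
      interval_cases i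
      rw [show PySem.Int.mod ((0:Int) + ((0:Nat) : Int)) capacity = 0 by
        norm_num; exact dcq_mod_self le_rfl hcpos]
      rw [dcq_getD_setD buffer 0 0 (some v) none le_rfl (by omega) le_rfl (by omega)]
      simp
  · obtain ⟨hf0, hfc, hrear, helem⟩ := hne hq
    have hfne : ¬ (front = -1) := by omega
    rw [if_neg hfne]
    have hR : PySem.Int.mod (rear + 1) capacity
        = PySem.Int.mod (front + (queue.length : Int)) capacity := by
      rw [hrear, dcq_mod_shift _ 1 hcpos]
      congr 1; ring
    have hR0 : 0 <= PySem.Int.mod (rear + 1) capacity := PySem.Int.mod_nonneg _ hcpos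
    have hRc : PySem.Int.mod (rear + 1) capacity < capacity := PySem.Int.mod_lt _ hcpos
    refine ⟨by simp [PySem.List.length_pySetD, hblen], hcap0, by simp; omega, by simp; omega,
      by simp, ?_⟩
    intro _
    refine ⟨hf0, hfc, ?_, ?_⟩
    · rw [hR]
      congr 1
      simp only [List.length_append, List.length_cons, List.length_nil]
      push_cast
      ring
    · intro i hi
      simp only [List.length_append, List.length_cons, List.length_nil] at hi
      have hi0 : 0 <= PySem.Int.mod (front + (i : Int)) capacity := PySem.Int.mod_nonneg _ hcpos
      have hic : PySem.Int.mod (front + (i : Int)) capacity < capacity := PySem.Int.mod_lt _ hcpos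
      have hbR : PySem.Int.mod (rear + 1) capacity < ((buffer.length : Nat) : Int) := by omega
      have hbi : PySem.Int.mod (front + (i : Int)) capacity < ((buffer.length : Nat) : Int) := by
        omega
      rw [dcq_getD_setD buffer (PySem.Int.mod (rear + 1) capacity)
        (PySem.Int.mod (front + (i : Int)) capacity) (some v) none hR0 hbR hi0 hbi]
      by_cases hil : i < queue.length
      · have hne2 : PySem.Int.mod (front + (i : Int)) capacity
            ≠ PySem.Int.mod (rear + 1) capacity := by
          rw [hR]
          intro h
          have hmn := dcq_mod_ne (a := front + (i : Int))
            (d := (queue.length : Int) - (i : Int)) (c := capacity) (by omega) (by omega)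
          rw [show front + (i : Int) + ((queue.length : Int) - (i : Int))
              = front + (queue.length : Int) by ring] at hmn
          exact hmn h.symm
        rw [if_neg (fun h => hne2 h)]
        rw [List.getElem_append_left hil]
        exact helem i hil
      · have hieq : i = queue.length := by omega
        subst hieq
        rw [if_pos (by rw [hR])]
        rw [List.getElem_concat_length rfl]

-- dequeueing the last element resets the sentinels
theorem dcq_inv_deq_nil {capacity : Int} {buffer : List (Option Int)} {front rear size : Int}
    {x : Int} (hinv : dcqInv capacity buffer front rear size [x]) :
    dcqInv capacity (PySem.List.pySetD buffer front none) (-1) (-1) (size - 1) [] := by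
  obtain ⟨hblen, hcap0, hsize, hle, hemp, hne⟩ := hinv
  exact ⟨by simp [PySem.List.length_pySetD, hblen], hcap0, by simp at hsize ⊢; omega,
    by simp; omega, fun _ => ⟨rfl, rfl⟩, fun h => absurd rfl h⟩

-- dequeueing from a longer queue advances front modulo capacity
theorem dcq_inv_deq_cons {capacity : Int} {buffer : List (Option Int)} {front rear size : Int}
    {x : Int} {rest : List Int} (hrest : rest ≠ [])
    (hinv : dcqInv capacity buffer front rear size (x :: rest)) :
    dcqInv capacity (PySem.List.pySetD buffer front none)
      (PySem.Int.mod (front + 1) capacity) rear (size - 1) rest := by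
  have hcpos := dcq_cap_pos hinv
  obtain ⟨hblen, hcap0, hsize, hle, hemp, hne⟩ := hinv
  obtain ⟨hf0, hfc, hrear, helem⟩ := hne (by simp)
  have hlen : (rest.length : Int) + 1 = ((x :: rest).length : Int) := by simp
  refine ⟨by simp [PySem.List.length_pySetD, hblen], hcap0, by simp at hsize ⊢; omega,
    by simp at hle ⊢; omega, fun h => absurd h hrest, ?_⟩
  intro _
  have hF0 : 0 <= PySem.Int.mod (front + 1) capacity := PySem.Int.mod_nonneg _ hcpos
  have hFc : PySem.Int.mod (front + 1) capacity < capacity := PySem.Int.mod_lt _ hcpos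
  refine ⟨hF0, hFc, ?_, ?_⟩
  · rw [hrear,
      show PySem.Int.mod (front + 1) capacity + (rest.length : Int) - 1
        = PySem.Int.mod (front + 1) capacity + ((rest.length : Int) - 1) by ring,
      dcq_mod_shift _ _ hcpos]
    congr 1
    simp only [List.length_cons]
    push_cast
    ring
  · intro i hi
    rw [dcq_mod_shift _ _ hcpos]
    have hi0 : 0 <= PySem.Int.mod (front + 1 + (i : Int)) capacity := PySem.Int.mod_nonneg _ hcpos
    have hic : PySem.Int.mod (front + 1 + (i : Int)) capacity < capacity := PySem.Int.mod_lt _ hcpos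
    have hbf : front < ((buffer.length : Nat) : Int) := by omega
    have hbi : PySem.Int.mod (front + 1 + (i : Int)) capacity < ((buffer.length : Nat) : Int) := by
      omega
    rw [dcq_getD_setD buffer front (PySem.Int.mod (front + 1 + (i : Int)) capacity)
      none none hf0 hbf hi0 hbi]
    have hnef : PySem.Int.mod (front + 1 + (i : Int)) capacity ≠ front := by
      rw [show front + 1 + (i : Int) = front + (1 + (i : Int)) by ring]
      have hlt : (1 : Int) + (i : Int) < capacity := by
        have : (i : Int) < (rest.length : Int) := by exact_mod_cast hi
        simp at hle; omega
      have := dcq_mod_ne (a := front) (d := 1 + (i : Int)) (by omega) hlt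
      rw [dcq_mod_self hf0 hfc] at this
      exact this
    rw [if_neg hnef]
    have := helem (i + 1) (by simp; omega)
    rw [show front + ((i + 1 : Nat) : Int) = front + 1 + (i : Int) by push_cast; ring] at this
    rw [this]
    simp

-- the three literal commands do not start with "enqueue"
theorem dcqSW_deq :
    PySem.Chars.startswith ['d','e','q','u','e','u','e'] ['e','n','q','u','e','u','e'] = false := by
  decide
theorem dcqSW_front :
    PySem.Chars.startswith ['f','r','o','n','t'] ['e','n','q','u','e','u','e'] = false := by
  decide
theorem dcqSW_rear :
    PySem.Chars.startswith ['r','e','a','r'] ['e','n','q','u','e','u','e'] = false := by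
  decide

-- the coupled loop: A's fold and B's fold produce the same results list
theorem dcq_loop (capacity : Int) (ops : List String) (hops : ops.all pvEnqOk = true)
    (buffer : List (Option Int)) (front rear size : Int) (queue : List Int)
    (res : List String) (hinv : dcqInv capacity buffer front rear size queue) :
    (ops.foldl (dcqStepA capacity) (buffer, front, rear, size, res)).2.2.2.2
      = (ops.foldl (dcqStepB capacity) (queue, res)).2 := by
  induction ops generalizing buffer front rear size queue res with
  | nil => rfl
  | cons op ops ih =>
    simp only [List.all_cons, Bool.and_eq_true] at hops
    obtain ⟨hop, hrest⟩ := hops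
    simp only [List.foldl_cons]
    by_cases hs : PySem.Str.startswith op "enqueue" = true
    · have hsC : PySem.Chars.startswith op.toList ['e','n','q','u','e','u','e'] = true := by
        simpa using hs
      have hparse : (dcqParse? op).isSome = true := by
        simp only [pvEnqOk, Bool.or_eq_true, Bool.not_eq_true'] at hop
        cases hop with
        | inl h => rw [h] at hs; exact absurd hs (by simp)
        | inr h => exact h
      obtain ⟨v, hv⟩ := Option.isSome_iff_exists.mp hparse
      have hsize : size = (queue.length : Int) := hinv.2.2.1
      by_cases hfull : size = capacity
      · have hqfull : (queue.length : Int) = capacity := by omega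
        rw [show dcqStepA capacity (buffer, front, rear, size, res) op
            = (buffer, front, rear, size, res ++ ["full"]) by
          simp [dcqStepA, hsC, hv, hfull]]
        rw [show dcqStepB capacity (queue, res) op = (queue, res ++ ["full"]) by
          simp [dcqStepB, hsC, hv, hqfull]]
        exact ih hrest _ _ _ _ _ _ hinv
      · have hqlt : (queue.length : Int) < capacity := by
          have := hinv.2.2.2.1
          omega
        rw [show dcqStepA capacity (buffer, front, rear, size, res) op
            = (PySem.List.pySetD buffer (PySem.Int.mod (rear + 1) capacity) (some v),
               (if front = -1 then 0 else front), PySem.Int.mod (rear + 1) capacity,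
               size + 1, res ++ ["true"]) by
          simp [dcqStepA, hsC, hv, hfull]]
        rw [show dcqStepB capacity (queue, res) op = (queue ++ [v], res ++ ["true"]) by
          simp [dcqStepB, hsC, hv]; omega]
        exact ih hrest _ _ _ _ _ _ (dcq_inv_enq hinv hqlt v)
    · have hsF : PySem.Chars.startswith op.toList ['e','n','q','u','e','u','e'] = false := by
        simpa using hs
      by_cases hd : op = "dequeue"
      · subst hd
        cases queue with
        | nil =>
          obtain ⟨hf, hr⟩ := hinv.2.2.2.2.1 rfl
          have hsz : size = 0 := by
            have := hinv.2.2.1; simpa using this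
          rw [show dcqStepA capacity (buffer, front, rear, size, res) "dequeue"
              = (buffer, front, rear, size, res ++ ["empty"]) by
            simp [dcqStepA, hsz, dcqSW_deq]]
          rw [show dcqStepB capacity (([] : List Int), res) "dequeue"
              = ([], res ++ ["empty"]) by simp [dcqStepB, dcqSW_deq]]
          exact ih hrest _ _ _ _ _ _ hinv
        | cons x rest =>
          have hsz : ¬ (size = 0) := by
            have := hinv.2.2.1; simp at this; omega
          have hread : PySem.List.pyGetD buffer front none = some x := dcq_front_read hinv
          by_cases hfr : front = rear
          · have hrnil : rest = [] := (dcq_fr_iff hinv).mp hfr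
            subst hrnil
            have hreadr : PySem.List.pyGetD buffer rear none = some x := hfr ▸ hread
            rw [show dcqStepA capacity (buffer, front, rear, size, res) "dequeue"
                = (PySem.List.pySetD buffer front none, -1, -1, size - 1,
                   res ++ [PySem.Int.toStr x]) by
              simp [dcqStepA, hsz, hfr, hreadr, dcqStr, dcqSW_deq]]
            rw [show dcqStepB capacity (([x] : List Int), res) "dequeue"
                = ([], res ++ [PySem.Int.toStr x]) by simp [dcqStepB, dcqSW_deq]]
            exact ih hrest _ _ _ _ _ _ (dcq_inv_deq_nil hinv)
          · have hrne : rest ≠ [] := fun h => hfr ((dcq_fr_iff hinv).mpr h)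
            rw [show dcqStepA capacity (buffer, front, rear, size, res) "dequeue"
                = (PySem.List.pySetD buffer front none, PySem.Int.mod (front + 1) capacity,
                   rear, size - 1, res ++ [PySem.Int.toStr x]) by
              simp [dcqStepA, hsz, hfr, hread, dcqStr, dcqSW_deq]]
            rw [show dcqStepB capacity ((x :: rest : List Int), res) "dequeue"
                = (rest, res ++ [PySem.Int.toStr x]) by simp [dcqStepB, dcqSW_deq]]
            exact ih hrest _ _ _ _ _ _ (dcq_inv_deq_cons hrne hinv)
      · by_cases hf : op = "front"
        · subst hf
          cases queue with
          | nil =>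
            have hfs : front = -1 := (dcq_front_sentinel hinv).mpr rfl
            rw [show dcqStepA capacity (buffer, front, rear, size, res) "front"
                = (buffer, front, rear, size, res ++ ["empty"]) by
              simp [dcqStepA, hfs, dcqSW_front]]
            rw [show dcqStepB capacity (([] : List Int), res) "front"
                = ([], res ++ ["empty"]) by simp [dcqStepB, dcqSW_front]]
            exact ih hrest _ _ _ _ _ _ hinv
          | cons x rest =>
            have hfs : ¬ (front = -1) := fun h => by
              simpa using (dcq_front_sentinel hinv).mp h
            have hread : PySem.List.pyGetD buffer front none = some x := dcq_front_read hinv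
            rw [show dcqStepA capacity (buffer, front, rear, size, res) "front"
                = (buffer, front, rear, size, res ++ [PySem.Int.toStr x]) by
              simp [dcqStepA, hfs, dcqSW_front, hread, dcqStr]]
            rw [show dcqStepB capacity ((x :: rest : List Int), res) "front"
                = (x :: rest, res ++ [PySem.Int.toStr x]) by simp [dcqStepB, dcqSW_front]]
            exact ih hrest _ _ _ _ _ _ hinv
        · by_cases hr : op = "rear"
          · subst hr
            cases queue with
            | nil =>
              have hrs : rear = -1 := (dcq_rear_sentinel hinv).mpr rfl
              rw [show dcqStepA capacity (buffer, front, rear, size, res) "rear"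
                  = (buffer, front, rear, size, res ++ ["empty"]) by
                simp [dcqStepA, dcqSW_rear, hrs]]
              rw [show dcqStepB capacity (([] : List Int), res) "rear"
                  = ([], res ++ ["empty"]) by simp [dcqStepB, dcqSW_rear]]
              exact ih hrest _ _ _ _ _ _ hinv
            | cons x rest =>
              have hrs : ¬ (rear = -1) := fun h => by
                simpa using (dcq_rear_sentinel hinv).mp h
              have hread := dcq_rear_read hinv
              rw [show dcqStepA capacity (buffer, front, rear, size, res) "rear"
                  = (buffer, front, rear, size,
                     res ++ [PySem.Int.toStr ((x :: rest).getLast (by simp))]) by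
                simp [dcqStepA, dcqSW_rear, hrs, hread, dcqStr]]
              rw [show dcqStepB capacity ((x :: rest : List Int), res) "rear"
                  = (x :: rest, res ++ [PySem.Int.toStr ((x :: rest).getLast (by simp))]) by
                simp [dcqStepB, dcqSW_rear, List.getLast?_eq_some_getLast]]
              exact ih hrest _ _ _ _ _ _ hinv
          · rw [show dcqStepA capacity (buffer, front, rear, size, res) op
                = (buffer, front, rear, size, res) by simp [dcqStepA, hsF, hd, hf, hr]]
            rw [show dcqStepB capacity (queue, res) op = (queue, res) by
              simp [dcqStepB, hsF, hd, hf, hr]]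
            exact ih hrest _ _ _ _ _ _ hinv

-- with no enqueue operations the queue stays empty whatever the capacity is
theorem dcq_loop_noenq (capacity : Int) (ops : List String)
    (hops : ops.all (fun op => !PySem.Str.startswith op "enqueue") = true)
    (buffer : List (Option Int)) (res : List String) :
    (ops.foldl (dcqStepA capacity) (buffer, -1, -1, 0, res)).2.2.2.2
      = (ops.foldl (dcqStepB capacity) ([], res)).2 := by
  induction ops generalizing res with
  | nil => rfl
  | cons op ops ih =>
    simp only [List.all_cons, Bool.and_eq_true, Bool.not_eq_true'] at hops
    obtain ⟨h1, h2⟩ := hops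
    simp only [List.foldl_cons]
    by_cases hd : op = "dequeue"
    · subst hd
      rw [show dcqStepA capacity (buffer, -1, -1, 0, res) "dequeue"
          = (buffer, -1, -1, 0, res ++ ["empty"]) by simp [dcqStepA, dcqSW_deq]]
      rw [show dcqStepB capacity (([] : List Int), res) "dequeue"
          = ([], res ++ ["empty"]) by simp [dcqStepB, dcqSW_deq]]
      exact ih h2 _
    · by_cases hf : op = "front"
      · subst hf
        rw [show dcqStepA capacity (buffer, -1, -1, 0, res) "front"
            = (buffer, -1, -1, 0, res ++ ["empty"]) by simp [dcqStepA, dcqSW_front]]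
        rw [show dcqStepB capacity (([] : List Int), res) "front"
            = ([], res ++ ["empty"]) by simp [dcqStepB, dcqSW_front]]
        exact ih h2 _
      · by_cases hr : op = "rear"
        · subst hr
          rw [show dcqStepA capacity (buffer, -1, -1, 0, res) "rear"
              = (buffer, -1, -1, 0, res ++ ["empty"]) by simp [dcqStepA, dcqSW_rear]]
          rw [show dcqStepB capacity (([] : List Int), res) "rear"
              = ([], res ++ ["empty"]) by simp [dcqStepB, dcqSW_rear]]
          exact ih h2 _
        · have h1C : PySem.Chars.startswith op.toList ['e','n','q','u','e','u','e'] = false := by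
            simpa using h1
          rw [show dcqStepA capacity (buffer, -1, -1, 0, res) op
              = (buffer, -1, -1, 0, res) by simp [dcqStepA, h1C, hd, hf, hr]]
          rw [show dcqStepB capacity (([] : List Int), res) op = ([], res) by
            simp [dcqStepB, h1C, hd, hf, hr]]
          exact ih h2 _

-- ===== VERDICT (by name: the statement is the Claim_ definition above) =====
theorem design_circular_queue_spec : Claim_equal_design_circular_queue := by
  intro operations capacity _ hpre
  unfold Spec_design_circular_queue design_circular_queue design_circular_queue_alt
  rcases hpre with ⟨hok, hcap | hno⟩
  · exact dcq_loop capacity operations hok _ _ _ _ [] []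
      ⟨by simp, hcap, by simp, by simpa using hcap, fun _ => ⟨rfl, rfl⟩, fun h => absurd rfl h⟩
  · exact dcq_loop_noenq capacity operations hno _ []
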